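-- pv_equiv track=rewrite | github.com/alejandro-mc/connect4 | connect4utils.py | __is_winning_line
-- ===== SOURCE A (Python) =====
-- def __is_winning_line(line,player):
--     count = 0
--     for i in line:
--
--         if i == player:
--             count += 1
--         else:
--             count = 0
--
--         if count == 4:
--             return True
--
--     return False
-- ===== SOURCE B (Python) =====
-- from itertools import groupby
--
-- def __is_winning_line(line, player):
--     for value, group in groupby(line):
--         if value == player and len(list(group)) >= 4:
--             return True
--     return False
-- ===== Notes on version B (the rewrite author's own statement) =====
-- stated objective: idiomatic
-- what changed: Replaces the running counter with reset by itertools.groupby over maximal runs of equal consecutive values, returning True when a run of the player's token has length >= 4.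
import Mathlib
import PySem

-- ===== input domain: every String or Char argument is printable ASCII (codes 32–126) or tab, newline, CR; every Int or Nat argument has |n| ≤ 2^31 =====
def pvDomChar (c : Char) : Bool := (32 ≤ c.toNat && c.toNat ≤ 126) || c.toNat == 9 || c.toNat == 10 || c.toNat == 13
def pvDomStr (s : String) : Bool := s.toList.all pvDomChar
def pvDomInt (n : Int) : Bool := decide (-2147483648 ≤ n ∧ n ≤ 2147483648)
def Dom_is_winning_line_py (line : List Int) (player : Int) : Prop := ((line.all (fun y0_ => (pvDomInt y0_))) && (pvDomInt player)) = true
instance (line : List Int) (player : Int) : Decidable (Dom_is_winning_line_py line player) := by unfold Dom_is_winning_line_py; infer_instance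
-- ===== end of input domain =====

-- ===== PORT A =====
-- literal port of A: running counter, reset on mismatch, early return at 4
def isWinA (player : Int) : List Int → Int → Bool
  | [], _ => false
  | i :: rest, count =>
    let count' := if i == player then count + 1 else 0
    if count' == 4 then true else isWinA player rest count'

def is_winning_line_py (line : List Int) (player : Int) : Bool :=
  isWinA player line 0

-- ===== PORT B =====
-- B (Source B): groupby into maximal runs of equal consecutive values; a run of the
-- player's token of length >= 4 wins. Ported as takeWhile/dropWhile run recursion.
theorem pv_dropWhile_lt {x : Int} {rest : List Int} :
    ((x :: rest).dropWhile (fun y => y == x)).length < (x :: rest).length := by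
  have h := List.length_dropWhile_le (p := fun y => y == x) (l := rest)
  simp [List.dropWhile]
  omega

def isWinB (player : Int) : List Int → Bool
  | [] => false
  | x :: rest =>
    if x == player && decide (4 ≤ ((x :: rest).takeWhile (fun y => y == x)).length) then true
    else isWinB player ((x :: rest).dropWhile (fun y => y == x))
termination_by l => l.length
decreasing_by exact pv_dropWhile_lt

def is_winning_line_py_alt (line : List Int) (player : Int) : Bool :=
  isWinB player line

-- ===== PRECONDITION & SPEC =====
def Spec_is_winning_line_py (line : List Int) (player : Int) (out : Bool) : Prop := out = is_winning_line_py_alt line player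
instance (line : List Int) (player : Int) (out : Bool) : Decidable (Spec_is_winning_line_py line player out) := by unfold Spec_is_winning_line_py; infer_instance

-- ===== CLAIM (what is proved, stated in full; the proofs are below) =====
def Claim_equal_is_winning_line_py : Prop := ∀ (line : List Int) (player : Int), Dom_is_winning_line_py line player → Spec_is_winning_line_py line player (is_winning_line_py line player)

-- ===== LEMMAS AND PROOFS =====

theorem isWinB_nil (player : Int) : isWinB player [] = false := by
  rw [isWinB]

theorem isWinB_cons (player x : Int) (rest : List Int) :
    isWinB player (x :: rest) =
      if x == player && decide (4 ≤ ((x :: rest).takeWhile (fun y => y == x)).length) then true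
      else isWinB player ((x :: rest).dropWhile (fun y => y == x)) := by
  rw [isWinB]

theorem isWinA_neq (player x : Int) (t : List Int) (c : Int) (hx : x ≠ player) :
    isWinA player (x :: t) c = isWinA player t 0 := by
  simp [isWinA, hx]

theorem isWinA_run (player : Int) (r : List Int) (t : List Int) (c : Int)
    (hr : ∀ y ∈ r, y = player) (hc : 0 ≤ c ∧ c < 4) :
    isWinA player (r ++ t) c =
      if 4 ≤ c + (r.length : Int) then true else isWinA player t (c + r.length) := by
  induction r generalizing c with
  | nil => simp; omega
  | cons a r' ih =>
    have ha : a = player := hr a (by simp)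
    by_cases h4 : c + 1 = 4
    · have hle : (4:Int) ≤ c + ((a :: r').length : Int) := by simp; omega
      simp only [List.cons_append, isWinA, ha, h4]
      simp
      exact Or.inl (by push_cast; omega)
    · have step : isWinA player (a :: (r' ++ t)) c = isWinA player (r' ++ t) (c + 1) := by
        simp [isWinA, ha, h4]
      rw [List.cons_append, step,
        ih (c + 1) (fun y hy => hr y (List.mem_cons_of_mem a hy)) (by omega)]
      have harith : c + 1 + (r'.length : Int) = c + ((a :: r').length : Int) := by
        simp; ring
      rw [harith]
  
theorem isWinA_zero_of_head_ne (player : Int) (t : List Int) (c : Int)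
    (ht : ∀ x t', t = x :: t' → x ≠ player) :
    isWinA player t c = isWinA player t 0 := by
  cases t with
  | nil => rfl
  | cons x t' =>
    have hx := ht x t' rfl
    rw [isWinA_neq player x t' c hx, isWinA_neq player x t' 0 hx]

theorem main_eq (player : Int) (l : List Int) : isWinA player l 0 = isWinB player l := by
  induction hn : l.length using Nat.strong_induction_on generalizing l with
  | _ n ih =>
  cases l with
  | nil => simp [isWinA, isWinB_nil]
  | cons x rest =>
    have hsplit : (x :: rest).takeWhile (fun y => y == x) ++ (x :: rest).dropWhile (fun y => y == x) = x :: rest :=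
      List.takeWhile_append_dropWhile
    have hlt : ((x :: rest).dropWhile (fun y => y == x)).length < (x :: rest).length :=
      pv_dropWhile_lt
    have ihd : isWinA player ((x :: rest).dropWhile (fun y => y == x)) 0
        = isWinB player ((x :: rest).dropWhile (fun y => y == x)) := by
      exact ih _ (by omega) _ rfl
    rw [isWinB_cons]
    set run := (x :: rest).takeWhile (fun y => y == x) with hrdef
    set dp := (x :: rest).dropWhile (fun y => y == x) with hddef
    have hrun : ∀ y ∈ run, y = x := by
      intro y hy
      have := List.mem_takeWhile_imp (hrdef ▸ hy)
      simpa using this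
    by_cases hx : x = player
    · have hrunp : ∀ y ∈ run, y = player := by
        intro y hy; rw [hrun y hy, hx]
      conv_lhs => rw [← hsplit]
      rw [isWinA_run _ _ _ 0 hrunp (by omega)]
      have hxp : (x == player) = true := by simp [hx]
      by_cases h4 : 4 ≤ run.length
      · have h4' : (4:Int) ≤ 0 + (run.length : Int) := by push_cast; omega
        rw [if_pos h4']
        have hb : (x == player && decide (4 ≤ run.length)) = true := by
          simp [hxp, h4]
        rw [hb, if_pos rfl]
      · have h4' : ¬ (4:Int) ≤ 0 + (run.length : Int) := by push_cast; omega
        rw [if_neg h4']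
        have hb : (x == player && decide (4 ≤ run.length)) = false := by
          simp [h4]
        rw [hb]
        simp only [Bool.false_eq_true, if_false]
        have hzero : isWinA player dp (0 + (run.length : Int)) = isWinA player dp 0 := by
          apply isWinA_zero_of_head_ne
          intro z t' hzt hzp
          have hhead := List.head?_dropWhile_not (p := fun y => y == x) (l := x :: rest)
          rw [← hddef, hzt] at hhead
          simp at hhead
          exact hhead (by rw [hzp, hx])
        rw [hzero, ihd]
    · rw [isWinA_neq player x rest 0 hx]
      have hxp : (x == player) = false := by simp [hx]
      rw [show (x == player && decide (4 ≤ run.length)) = false by simp [hxp]]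
      simp only [Bool.false_eq_true, if_false]
      have hdrop_cons : dp = rest.dropWhile (fun y => y == x) := by
        rw [hddef, List.dropWhile_cons_of_pos (by simp)]
      have hskip : isWinA player rest 0 = isWinA player (rest.dropWhile (fun y => y == x)) 0 := by
        clear ihd hlt hrun hsplit hn hdrop_cons hrdef hddef
        induction rest with
        | nil => rfl
        | cons a t iht =>
          by_cases hax : a = x
          · subst hax
            rw [isWinA_neq player a t 0 hx,
              List.dropWhile_cons_of_pos (by simp)]
            exact iht
          · rw [List.dropWhile_cons_of_neg (by simp [hax])]
      rw [hskip, ← hdrop_cons, ihd]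

-- ===== VERDICT (by name: the statement is the Claim_ definition above) =====
theorem is_winning_line_py_spec : Claim_equal_is_winning_line_py := by
  intro line player _
  unfold Spec_is_winning_line_py is_winning_line_py is_winning_line_py_alt
  exact main_eq player line
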